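-- pv_equiv track=rewrite | github.com/gportella/codewars_challenges | circular_genome_assembly/genome_assembly_codewars.py | align_best_start_le1
-- ===== SOURCE A (Python) =====
-- from typing import List, Tuple, Optional
--
-- def hamming_mismatches(s1: str, s2: str, max_allowed: int = float("inf")) -> int:
--     mismatches = 0
--     for c1, c2 in zip(s1, s2):
--         if c1 != c2:
--             mismatches += 1
--             if mismatches > max_allowed:
--                 return mismatches
--     return mismatches
--
-- def align_best_start_le1(read: str, contig: str) -> Optional[int]:
--     contig = contig.strip().upper()
--     read = read.strip().upper()
--     R = len(contig)
--     ref2 = contig + contig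
--     L = len(read)
--
--     best_s = None
--     best_mm = 2
--     for s in range(R):
--         w = ref2[s : s + L]
--         if len(w) < L:
--             break
--         mm = hamming_mismatches(read, w, max_allowed=1)
--         if mm <= 1 and mm < best_mm:
--             best_mm = mm
--             best_s = s
--             if mm == 0:
--                 break
--     return best_s
-- ===== SOURCE B (Python) =====
-- def align_best_start_le1(read, contig):
--     contig = contig.strip().upper()
--     read = read.strip().upper()
--     R = len(contig)
--     L = len(read)
--     if L > 2 * R:
--         return None
--     ref2 = contig + contig
--     limit = min(R, 2 * R - L + 1)
--     i = ref2.find(read)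
--     if 0 <= i < limit:
--         return i
--     # 1-mismatch pass: a window with exactly one mismatch must match one half
--     # of the read exactly, so filter candidates with two startswith probes.
--     h = L // 2
--     a = read[:h]
--     b = read[h:]
--     for s in range(limit):
--         if ref2.startswith(a, s) or ref2.startswith(b, s + h):
--             mm = 0
--             for c1, c2 in zip(read, ref2[s:s + L]):
--                 if c1 != c2:
--                     mm += 1
--             if mm == 1:
--                 return s
--     return None
-- ===== Notes on version B (the rewrite author's own statement) =====
-- stated objective: faster
-- what changed: Instead of slicing a window and counting capped Hamming mismatches at every start, B first looks for an exact occurrence with a single substring search (str.find) and, only if that fails, scans starts with a filter-and-verify scheme: a window with exactly one mismatch must match one half of the read exactly, so two copy-free startswith probes reject almost every start before any per-window slice or character count is done.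
import Mathlib
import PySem

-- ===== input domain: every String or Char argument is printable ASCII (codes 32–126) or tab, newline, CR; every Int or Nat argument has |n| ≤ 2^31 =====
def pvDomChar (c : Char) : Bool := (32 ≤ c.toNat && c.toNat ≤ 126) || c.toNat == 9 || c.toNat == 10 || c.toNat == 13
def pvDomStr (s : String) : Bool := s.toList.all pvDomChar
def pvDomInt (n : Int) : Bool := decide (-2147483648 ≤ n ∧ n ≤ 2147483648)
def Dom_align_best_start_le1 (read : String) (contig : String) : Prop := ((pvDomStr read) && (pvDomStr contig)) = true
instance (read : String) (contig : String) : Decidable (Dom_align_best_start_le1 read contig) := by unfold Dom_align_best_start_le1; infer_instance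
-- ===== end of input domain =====

-- B replaces A's per-start window slice + capped Hamming count by one substring search for
-- an exact hit, then a filter-and-verify 1-mismatch scan (a 1-mismatch window matches one
-- half of the read exactly); measurably faster on large inputs.


-- ===== PORT A =====
-- hamming_mismatches(s1, s2, max_allowed): loop over zip with early return
def pvHamLoop (zs : List (Char × Char)) (mismatches : Int) (maxAllowed : Int) : Int :=
  match zs with
  | [] => mismatches
  | (c1, c2) :: rest =>
    if c1 ≠ c2 then
      if mismatches + 1 > maxAllowed then mismatches + 1
      else pvHamLoop rest (mismatches + 1) maxAllowed
    else pvHamLoop rest mismatches maxAllowed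

-- A's 'for s in range(R)' loop, state (best_s, best_mm), with the two breaks
def pvALoop (read ref2 : List Char) (L : Nat) :
    List Int → Option Int → Int → Option Int
  | [], best_s, _ => best_s
  | s :: rest, best_s, best_mm =>
    let w := PySem.List.slice ref2 (some s) (some (s + (L : Int)))
    if w.length < L then best_s
    else
      let mm := pvHamLoop (read.zip w) 0 1
      if mm ≤ 1 ∧ mm < best_mm then
        if mm = 0 then some s
        else pvALoop read ref2 L rest (some s) mm
      else pvALoop read ref2 L rest best_s best_mm

def align_best_start_le1 (read : String) (contig : String) : Option Int :=
  let contigU := PySem.Chars.upper (PySem.Chars.strip contig.toList)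
  let readU := PySem.Chars.upper (PySem.Chars.strip read.toList)
  let R := contigU.length
  let ref2 := contigU ++ contigU
  let L := readU.length
  pvALoop readU ref2 L (PySem.List.pyRange 0 (R : Int) 1) none 2

-- ===== PORT B =====
-- B's verify: the inner 'mm' counting loop over zip(read, ref2[s:s+L])
def pvMMCount (zs : List (Char × Char)) : Int :=
  zs.foldl (fun acc p => if p.1 ≠ p.2 then acc + 1 else acc) 0

-- B's 'for s in range(limit)' filter-and-verify scan
-- (ref2.startswith(x, s) is ported by hand as startswith on ref2.drop s — exact for 0 ≤ s)
def pvBScan (readU ref2 a b : List Char) (L h : Nat) : List Nat → Option Int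
  | [] => none
  | s :: rest =>
    if PySem.Chars.startswith (ref2.drop s) a || PySem.Chars.startswith (ref2.drop (s + h)) b then
      let mm := pvMMCount (readU.zip (PySem.List.slice ref2 (some (s : Int)) (some ((s : Int) + (L : Int)))))
      if mm = 1 then some (s : Int) else pvBScan readU ref2 a b L h rest
    else pvBScan readU ref2 a b L h rest

def align_best_start_le1_alt (read : String) (contig : String) : Option Int :=
  let contigU := PySem.Chars.upper (PySem.Chars.strip contig.toList)
  let readU := PySem.Chars.upper (PySem.Chars.strip read.toList)
  let R := contigU.length
  let L := readU.length
  if L > 2 * R then none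
  else
    let ref2 := contigU ++ contigU
    let limit := min R (2 * R - L + 1)
    let i := PySem.Chars.find ref2 readU
    if 0 ≤ i ∧ i < (limit : Int) then some i
    else
      let h := L / 2  -- Python 'L // 2' on the nonnegative Nat length: floor division is exact here
      pvBScan readU ref2 (readU.take h) (readU.drop h) L h (List.range limit)

-- ===== PRECONDITION & SPEC =====
def Spec_align_best_start_le1 (read : String) (contig : String) (out : Option Int) : Prop := out = align_best_start_le1_alt read contig
instance (read : String) (contig : String) (out : Option Int) : Decidable (Spec_align_best_start_le1 read contig out) := by unfold Spec_align_best_start_le1; infer_instance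

-- ===== CLAIM (what is proved, stated in full; the proofs are below) =====
def Claim_equal_align_best_start_le1 : Prop := ∀ (read : String) (contig : String), Dom_align_best_start_le1 read contig → Spec_align_best_start_le1 read contig (align_best_start_le1 read contig)

-- ===== LEMMAS AND PROOFS =====

-- helper defs/lemmas (proof side)

-- number of mismatches between r and the window of length |r| starting at s in c2
def pvCnt (r c2 : List Char) (s : Nat) : Nat :=
  (r.zip ((c2.drop s).take r.length)).countP (fun p => decide (p.1 ≠ p.2))

lemma pvZipCountZero : ∀ (xs ys : List Char), xs.length = ys.length →
    ((xs.zip ys).countP (fun p => decide (p.1 ≠ p.2)) = 0 ↔ xs = ys) := by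
  intro xs
  induction xs with
  | nil => intro ys h; cases ys <;> simp_all
  | cons x xs ih =>
    intro ys h
    cases ys with
    | nil => simp at h
    | cons y ys =>
      have h' : xs.length = ys.length := by simpa using h
      by_cases hxy : x = y
      · subst hxy
        rw [List.zip_cons_cons, List.countP_cons]
        rw [show (decide ((x, x).1 ≠ (x, x).2)) = false from by simp]
        simp only [Bool.false_eq_true, if_false, add_zero]
        rw [ih ys h']
        simp
      · rw [List.zip_cons_cons, List.countP_cons]
        rw [show (decide ((x, y).1 ≠ (x, y).2)) = true from by simp [hxy]]
        simp [hxy]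

lemma pvHamMin : ∀ (zs : List (Char × Char)) (m : Int), m ≤ 1 →
    pvHamLoop zs m 1 = min (m + ((zs.countP (fun p => decide (p.1 ≠ p.2)) : Nat) : Int)) 2 := by
  intro zs
  induction zs with
  | nil => intro m hm; simp [pvHamLoop]; omega
  | cons z zs ih =>
    intro m hm
    obtain ⟨c1, c2⟩ := z
    rw [List.countP_cons]
    by_cases hc : c1 = c2
    · rw [show (decide ((c1, c2).1 ≠ (c1, c2).2)) = false from by simp [hc]]
      simp only [Bool.false_eq_true, if_false, add_zero]
      simp only [pvHamLoop]
      rw [if_neg (by simp [hc])]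
      exact ih m hm
    · rw [show (decide ((c1, c2).1 ≠ (c1, c2).2)) = true from by simp [hc]]
      simp only [pvHamLoop]
      rw [if_pos (by exact hc)]
      by_cases h1 : m + 1 > 1
      · rw [if_pos h1]
        push_cast
        omega
      · rw [if_neg h1, ih (m + 1) (by omega)]
        push_cast
        omega

lemma pvMMCount_eq (zs : List (Char × Char)) :
    pvMMCount zs = ((zs.countP (fun p => decide (p.1 ≠ p.2)) : Nat) : Int) := by
  simpa [pvMMCount] using PySem.List.foldl_ite_add_one (fun p : Char × Char => p.1 ≠ p.2) zs 0

lemma pvCnt0_iff (r c2 : List Char) (s : Nat) (h : s + r.length ≤ c2.length) :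
    pvCnt r c2 s = 0 ↔ r <+: c2.drop s := by
  have hlen : ((c2.drop s).take r.length).length = r.length := by
    simp [List.length_take, List.length_drop]; omega
  rw [pvCnt, pvZipCountZero _ _ hlen.symm, List.prefix_iff_eq_take]

lemma pvPigeon (r c2 : List Char) (s : Nat) (hs : s + r.length ≤ c2.length)
    (h1 : pvCnt r c2 s = 1) (h : Nat) (hh : h ≤ r.length) :
    (PySem.Chars.startswith (c2.drop s) (r.take h)
      || PySem.Chars.startswith (c2.drop (s + h)) (r.drop h)) = true := by
  set L := r.length with hL
  set w := (c2.drop s).take L with hw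
  have hwlen : w.length = L := by
    simp [hw, List.length_take, List.length_drop]; omega
  have hsplit : r.zip w = (r.take h).zip (w.take h) ++ (r.drop h).zip (w.drop h) := by
    have : (r.take h).length = (w.take h).length := by
      simp [List.length_take, hwlen, hL]
    calc r.zip w = (r.take h ++ r.drop h).zip (w.take h ++ w.drop h) := by
          rw [List.take_append_drop, List.take_append_drop]
      _ = _ := List.zip_append this
  rw [pvCnt, ← hL, ← hw, hsplit, List.countP_append] at h1
  have hcase : ((r.take h).zip (w.take h)).countP (fun p => decide (p.1 ≠ p.2)) = 0
      ∨ ((r.drop h).zip (w.drop h)).countP (fun p => decide (p.1 ≠ p.2)) = 0 := by omega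
  rcases hcase with hc | hc
  · have heq : r.take h = w.take h :=
      (pvZipCountZero _ _ (by simp [List.length_take, hwlen, hL])).mp hc
    have : w.take h = (c2.drop s).take h := by
      rw [hw, List.take_take]; congr 1; omega
    have hpre : r.take h <+: c2.drop s := by
      rw [heq, this]; exact List.take_prefix h _
    simp [Bool.or_eq_true, PySem.Chars.startswith_iff, hpre]
  · have heq : r.drop h = w.drop h :=
      (pvZipCountZero _ _ (by simp [hwlen, hL])).mp hc
    have : w.drop h = ((c2.drop (s + h))).take (L - h) := by
      rw [hw, List.drop_take, List.drop_drop]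
    have hpre : r.drop h <+: c2.drop (s + h) := by
      rw [heq, this]; exact List.take_prefix _ _
    simp [Bool.or_eq_true, PySem.Chars.startswith_iff, hpre]

lemma pvFindRangeNone (n : Nat) (p : Nat → Bool) (h : ∀ k, k < n → p k = false) :
    (List.range n).find? p = none := by
  rw [List.find?_eq_none]
  intro x hx
  simp [h x (List.mem_range.mp hx)]

lemma pvFindRangeSome (n k : Nat) (p : Nat → Bool) (hk : k < n) (hp : p k = true)
    (hmin : ∀ j, j < k → p j = false) : (List.range n).find? p = some k := by
  have hn : n = k + (n - k - 1 + 1) := by omega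
  rw [hn, List.range_add, List.find?_append, pvFindRangeNone k p hmin,
    List.range_succ_eq_map]
  simp [hp]

lemma pvTakeWhileRange' (K : Nat) : ∀ (n a : Nat),
    (List.range' a n).takeWhile (fun s => decide (s < K)) = List.range' a (min n (K - a)) := by
  intro n
  induction n with
  | zero => intro a; simp
  | succ n ih =>
    intro a
    rw [List.range'_succ]
    by_cases ha : a < K
    · rw [List.takeWhile_cons_of_pos (by simp [ha]), ih (a + 1)]
      have hmin : min (n + 1) (K - a) = (min n (K - (a + 1))) + 1 := by omega
      rw [hmin, List.range'_succ]
    · rw [List.takeWhile_cons_of_neg (by simp [ha])]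
      have hmin : min (n + 1) (K - a) = 0 := by omega
      rw [hmin]
      simp

lemma pvTakeWhileRange (n K : Nat) :
    (List.range n).takeWhile (fun s => decide (s < K)) = List.range (min n K) := by
  rw [List.range_eq_range', List.range_eq_range', pvTakeWhileRange' K n 0, Nat.sub_zero]

lemma pvALoopStop (r c2 : List Char) : ∀ (ns : List Nat) (b : Option Int) (m : Int),
    (∀ s ∈ ns, s ≤ c2.length) →
    pvALoop r c2 r.length (ns.map Int.ofNat) b m
      = pvALoop r c2 r.length
          ((ns.takeWhile (fun s => decide (s + r.length ≤ c2.length))).map Int.ofNat) b m := by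
  intro ns
  induction ns with
  | nil => intro b m _; simp
  | cons s ns ih =>
    intro b m hmem
    by_cases hok : s + r.length ≤ c2.length
    · rw [List.takeWhile_cons_of_pos (by exact decide_eq_true hok)]
      simp only [List.map_cons, pvALoop, Int.ofNat_eq_natCast]
      rw [PySem.List.slice_natCast_add]
      have hlen : ¬ ((c2.drop s).take r.length).length < r.length := by
        simp only [List.length_take, List.length_drop]
        omega
      rw [if_neg hlen, if_neg hlen]
      split_ifs with h1 h2
      · rfl
      · exact ih _ _ (fun x hx => hmem x (List.mem_cons_of_mem _ hx))
      · exact ih _ _ (fun x hx => hmem x (List.mem_cons_of_mem _ hx))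
    · rw [List.takeWhile_cons_of_neg (by exact fun hcon => hok (of_decide_eq_true hcon))]
      simp only [List.map_cons, List.map_nil, pvALoop, Int.ofNat_eq_natCast]
      rw [PySem.List.slice_natCast_add]
      have hsle : s ≤ c2.length := hmem s List.mem_cons_self
      have hlen : ((c2.drop s).take r.length).length < r.length := by
        simp only [List.length_take, List.length_drop]
        omega
      rw [if_pos hlen]

lemma pvALoopState1 (r c2 : List Char) : ∀ (ns : List Nat) (t : Int),
    (∀ s ∈ ns, s + r.length ≤ c2.length) →
    pvALoop r c2 r.length (ns.map Int.ofNat) (some t) 1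
      = ((ns.find? (fun s => pvCnt r c2 s == 0)).map Int.ofNat).or (some t) := by
  intro ns
  induction ns with
  | nil => intro t _; simp [pvALoop]
  | cons s ns ih =>
    intro t hmem
    have hs : s + r.length ≤ c2.length := hmem s List.mem_cons_self
    simp only [List.map_cons, pvALoop, Int.ofNat_eq_natCast]
    rw [PySem.List.slice_natCast_add]
    have hlen : ¬ ((c2.drop s).take r.length).length < r.length := by
      simp only [List.length_take, List.length_drop]
      omega
    rw [if_neg hlen]
    rw [pvHamMin _ 0 (by omega)]
    have hcz : (r.zip ((c2.drop s).take r.length)).countP (fun p => decide (p.1 ≠ p.2)) = pvCnt r c2 s := rfl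
    rw [hcz, zero_add]
    by_cases h0 : pvCnt r c2 s = 0
    · have hmm : min ((pvCnt r c2 s : Nat) : Int) 2 = 0 := by rw [h0]; simp
      rw [hmm, if_pos (by norm_num), if_pos rfl]
      rw [List.find?_cons_of_pos (by simp [h0])]
      simp
    · have hge : 1 ≤ pvCnt r c2 s := Nat.one_le_iff_ne_zero.mpr h0
      rw [if_neg (by rintro ⟨-, hlt⟩; omega)]
      rw [List.find?_cons_of_neg (by simp [h0])]
      exact ih t (fun x hx => hmem x (List.mem_cons_of_mem _ hx))

lemma pvALoopState2 (r c2 : List Char) : ∀ (ns : List Nat),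
    (∀ s ∈ ns, s + r.length ≤ c2.length) →
    pvALoop r c2 r.length (ns.map Int.ofNat) none 2
      = ((ns.find? (fun s => pvCnt r c2 s == 0)).map Int.ofNat).or
          ((ns.find? (fun s => pvCnt r c2 s == 1)).map Int.ofNat) := by
  intro ns
  induction ns with
  | nil => intro _; simp [pvALoop]
  | cons s ns ih =>
    intro hmem
    have hs : s + r.length ≤ c2.length := hmem s List.mem_cons_self
    simp only [List.map_cons, pvALoop, Int.ofNat_eq_natCast]
    rw [PySem.List.slice_natCast_add]
    have hlen : ¬ ((c2.drop s).take r.length).length < r.length := by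
      simp only [List.length_take, List.length_drop]
      omega
    rw [if_neg hlen]
    rw [pvHamMin _ 0 (by omega)]
    have hcz : (r.zip ((c2.drop s).take r.length)).countP (fun p => decide (p.1 ≠ p.2)) = pvCnt r c2 s := rfl
    rw [hcz, zero_add]
    by_cases h0 : pvCnt r c2 s = 0
    · have hmm : min ((pvCnt r c2 s : Nat) : Int) 2 = 0 := by rw [h0]; simp
      rw [hmm, if_pos (by norm_num), if_pos rfl]
      rw [List.find?_cons_of_pos (by simp [h0])]
      simp
    · by_cases h1 : pvCnt r c2 s = 1
      · have hmm : min ((pvCnt r c2 s : Nat) : Int) 2 = 1 := by rw [h1]; simp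
        rw [hmm, if_pos (by norm_num), if_neg (by norm_num)]
        rw [pvALoopState1 r c2 ns s (fun x hx => hmem x (List.mem_cons_of_mem _ hx))]
        rw [List.find?_cons_of_neg (by simp [h0]), List.find?_cons_of_pos (by simp [h1])]
        cases hfe : ns.find? (fun s => pvCnt r c2 s == 0) <;> simp
      · have hge : 2 ≤ pvCnt r c2 s := by omega
        rw [if_neg (by rintro ⟨hle, -⟩; omega)]
        rw [List.find?_cons_of_neg (by simp [h0]), List.find?_cons_of_neg (by simp [h1])]
        exact ih (fun x hx => hmem x (List.mem_cons_of_mem _ hx))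

lemma pvBScanEq (r c2 : List Char) : ∀ (ns : List Nat),
    (∀ s ∈ ns, s + r.length ≤ c2.length) →
    pvBScan r c2 (r.take (r.length / 2)) (r.drop (r.length / 2)) r.length (r.length / 2) ns
      = (ns.find? (fun s => pvCnt r c2 s == 1)).map Int.ofNat := by
  intro ns
  induction ns with
  | nil => intro _; simp [pvBScan]
  | cons s ns ih =>
    intro hmem
    have hs : s + r.length ≤ c2.length := hmem s List.mem_cons_self
    simp only [pvBScan]
    rw [PySem.List.slice_natCast_add, pvMMCount_eq]
    have hcz : (r.zip ((c2.drop s).take r.length)).countP (fun p => decide (p.1 ≠ p.2)) = pvCnt r c2 s := rfl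
    rw [hcz]
    by_cases h1 : pvCnt r c2 s = 1
    · rw [if_pos (pvPigeon r c2 s hs h1 (r.length / 2) (Nat.div_le_self _ _))]
      rw [if_pos (by exact_mod_cast congrArg (Nat.cast : Nat → Int) h1)]
      rw [List.find?_cons_of_pos (by simp [h1])]
      simp
    · have hne : ¬ ((pvCnt r c2 s : Nat) : Int) = 1 := by exact_mod_cast h1
      rw [List.find?_cons_of_neg (by simp [h1])]
      by_cases hfil : (PySem.Chars.startswith (c2.drop s) (r.take (r.length / 2))
          || PySem.Chars.startswith (c2.drop (s + r.length / 2)) (r.drop (r.length / 2))) = true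
      · rw [if_pos hfil, if_neg hne]
        exact ih (fun x hx => hmem x (List.mem_cons_of_mem _ hx))
      · rw [if_neg hfil]
        exact ih (fun x hx => hmem x (List.mem_cons_of_mem _ hx))

-- ===== VERDICT (by name: the statement is the Claim_ definition above) =====
theorem align_best_start_le1_spec : Claim_equal_align_best_start_le1 := by
  intro read contig _
  simp only [Spec_align_best_start_le1, align_best_start_le1, align_best_start_le1_alt]
  set cu := PySem.Chars.upper (PySem.Chars.strip contig.toList) with hcu
  set r := PySem.Chars.upper (PySem.Chars.strip read.toList) with hr
  have hN : (cu ++ cu).length = 2 * cu.length := by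
    rw [List.length_append]; omega
  -- A side: cut the loop at the first short window, then characterise it
  rw [PySem.List.pyRange_zero_natCast]
  have hmap : List.map (fun k : Nat => (k : Int)) (List.range cu.length) = List.map Int.ofNat (List.range cu.length) := by
    simp
  rw [hmap]
  rw [pvALoopStop r (cu ++ cu) (List.range cu.length) none 2
    (fun s hs => by have := List.mem_range.mp hs; omega)]
  have hpred : (fun s => decide (s + r.length ≤ (cu ++ cu).length))
      = (fun s => decide (s < (cu ++ cu).length + 1 - r.length)) :=
    funext fun s => decide_eq_decide.mpr (by omega)
  rw [hpred, pvTakeWhileRange]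
  have hwin : ∀ s, s < min cu.length ((cu ++ cu).length + 1 - r.length) →
      s + r.length ≤ (cu ++ cu).length := by intro s hs; omega
  rw [pvALoopState2 r (cu ++ cu) (List.range (min cu.length ((cu ++ cu).length + 1 - r.length)))
    (fun s hs => hwin s (List.mem_range.mp hs))]
  -- B side
  by_cases hbig : r.length > 2 * cu.length
  · rw [if_pos hbig]
    have hlim : min cu.length ((cu ++ cu).length + 1 - r.length) = 0 := by omega
    rw [hlim]
    simp
  · rw [if_neg hbig]
    have hlimeq : min cu.length (2 * cu.length - r.length + 1)
        = min cu.length ((cu ++ cu).length + 1 - r.length) := by omega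
    rw [hlimeq]
    set limit := min cu.length ((cu ++ cu).length + 1 - r.length) with hlimdef
    by_cases hcond : 0 ≤ PySem.Chars.find (cu ++ cu) r ∧
        PySem.Chars.find (cu ++ cu) r < (limit : Int)
    · rw [if_pos hcond]
      obtain ⟨hpre, hminf⟩ := PySem.Chars.find_spec hcond.1
      have htn : (PySem.Chars.find (cu ++ cu) r).toNat < limit := by omega
      have hplen : (PySem.Chars.find (cu ++ cu) r).toNat + r.length ≤ (cu ++ cu).length := by
        have h1 := hpre.length_le
        rw [List.length_drop] at h1
        omega
      have hE : (List.range limit).find? (fun s => pvCnt r (cu ++ cu) s == 0)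
          = some (PySem.Chars.find (cu ++ cu) r).toNat := by
        apply pvFindRangeSome _ _ _ htn
        · simp [(pvCnt0_iff r (cu ++ cu) _ hplen).mpr hpre]
        · intro j hj
          have hnp : pvCnt r (cu ++ cu) j ≠ 0 := fun h =>
            (hminf j hj) ((pvCnt0_iff r (cu ++ cu) j (hwin j (by omega))).mp h)
          simp [hnp]
      rw [hE]
      simp [Int.ofNat_eq_natCast, Int.toNat_of_nonneg hcond.1]
    · rw [if_neg hcond]
      have hE : (List.range limit).find? (fun s => pvCnt r (cu ++ cu) s == 0) = none := by
        apply pvFindRangeNone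
        intro k hk
        have hnp : pvCnt r (cu ++ cu) k ≠ 0 := by
          intro h0
          have hpre : r <+: (cu ++ cu).drop k := (pvCnt0_iff r (cu ++ cu) k (hwin k hk)).mp h0
          by_cases hpos : 0 ≤ PySem.Chars.find (cu ++ cu) r
          · obtain ⟨-, hminf⟩ := PySem.Chars.find_spec hpos
            have hkf : k < (PySem.Chars.find (cu ++ cu) r).toNat := by
              have : ¬ PySem.Chars.find (cu ++ cu) r < (limit : Int) := fun hc => hcond ⟨hpos, hc⟩
              omega
            exact hminf k hkf hpre
          · have hneg : PySem.Chars.find (cu ++ cu) r = -1 := by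
              have := PySem.Chars.neg_one_le_find (cu ++ cu) r
              omega
            have hninf : ¬ r <:+: (cu ++ cu) := (PySem.Chars.find_eq_neg_one_iff _ _).mp hneg
            exact hninf (hpre.isInfix.trans (List.drop_suffix k (cu ++ cu)).isInfix)
        simp [hnp]
      rw [hE, pvBScanEq r (cu ++ cu) (List.range limit) (fun s hs => hwin s (List.mem_range.mp hs))]
      simp
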